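-- pv_equiv track=rewrite | github.com/kyuhyongpark/boolmore | test/test_benchmarks2.py | name_adjustment
-- ===== SOURCE A (Python) =====
-- def name_adjustment(name: str) -> str:
--     """Adjust the node name to fit proper formatting.
--
--     Parameters
--     ----------
--     name : str
--         Original name of the node.
--
--     Returns
--     -------
--     str
--         Adjusted name of the node.
--     """
--
--     not_allowed = ["-", ")", "(", "/"]
--
--     for expression in not_allowed:
--         name = name.replace(expression, "_")
--
--     name = name.replace("\\", "")
--     name = name.replace("+", "_plus_")
--
--     if name[0].isdigit():
--         name = 'number_' + name
--
--     return name
-- ===== SOURCE B (Python) =====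
-- def name_adjustment(name: str) -> str:
--     """Adjust the node name to fit proper formatting (single-pass table version)."""
--     table = {'-': '_', ')': '_', '(': '_', '/': '_', '\\': '', '+': '_plus_'}
--     out = []
--     for ch in name:
--         out.append(table.get(ch, ch))
--     result = ''.join(out)
--     if result[0].isdigit():
--         result = 'number_' + result
--     return result
-- ===== Notes on version B (the rewrite author's own statement) =====
-- stated objective: idiomatic
-- what changed: Replaces six sequential whole-string replace() passes by a single pass over the characters driven by a translation dict, joining the pieces once at the end.
import Mathlib
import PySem

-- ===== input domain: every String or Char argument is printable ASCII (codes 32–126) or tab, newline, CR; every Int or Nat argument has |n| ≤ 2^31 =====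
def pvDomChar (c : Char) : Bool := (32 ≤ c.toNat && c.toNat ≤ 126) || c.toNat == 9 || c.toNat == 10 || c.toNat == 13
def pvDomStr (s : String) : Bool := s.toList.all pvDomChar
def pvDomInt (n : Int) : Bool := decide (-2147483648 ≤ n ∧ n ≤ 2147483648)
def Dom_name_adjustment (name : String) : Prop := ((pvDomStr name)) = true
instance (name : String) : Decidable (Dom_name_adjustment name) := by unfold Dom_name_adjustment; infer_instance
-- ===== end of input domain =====

-- B replaces A's six sequential whole-string replace() passes by a single pass over the
-- characters driven by a translation dict, joined once at the end (idiomatic, one traversal).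

-- ===== PORT A =====
def name_adjustment (name : String) : String :=
  -- for expression in not_allowed: name = name.replace(expression, "_")
  let n1 := ["-", ")", "(", "/"].foldl (fun n e => PySem.Str.replace n e "_") name
  let n2 := PySem.Str.replace n1 "\\" ""
  let n3 := PySem.Str.replace n2 "+" "_plus_"
  match PySem.Str.pyGet? n3 0 with          -- name[0]; none = IndexError, excluded by Pre_
  | some c => if PySem.Chars.isdigit c then String.ofList ("number_".toList ++ n3.toList) else n3
  | none => n3

-- ===== PORT B =====
-- table = {'-': '_', ')': '_', '(': '_', '/': '_', '\\': '', '+': '_plus_'}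
def pvTableB : PySem.Dict Char (List Char) :=
  PySem.Dict.ofList [('-', ['_']), (')', ['_']), ('(', ['_']), ('/', ['_']),
                     ('\\', []), ('+', ['_','p','l','u','s','_'])]

def name_adjustment_alt (name : String) : String :=
  -- out = []; for ch in name: out.append(table.get(ch, ch))
  let out := name.toList.foldl (fun acc ch => acc ++ [PySem.Dict.getD pvTableB ch [ch]]) []
  let result := PySem.Chars.join [] out     -- ''.join(out)
  match PySem.List.pyGet? result 0 with     -- result[0]; none = IndexError, excluded by Pre_
  | some c => if PySem.Chars.isdigit c then String.ofList ("number_".toList ++ result)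
              else String.ofList result
  | none => String.ofList result

-- ===== PRECONDITION & SPEC =====
-- Pre_ excludes exactly the inputs whose every character is a backslash (including the empty
-- string): there the sanitized string is empty and A's name[0] raises IndexError (B raises too).
def Pre_name_adjustment (name : String) : Prop := name.toList.any (fun c => c ≠ '\\') = true
instance (name : String) : Decidable (Pre_name_adjustment name) := by unfold Pre_name_adjustment; infer_instance
def pvWitness_name_adjustment : String := "7a-b"

def Spec_name_adjustment (name : String) (out : String) : Prop := out = name_adjustment_alt name
instance (name : String) (out : String) : Decidable (Spec_name_adjustment name out) := by unfold Spec_name_adjustment; infer_instance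

-- ===== CLAIM (what is proved, stated in full; the proofs are below) =====
def Claim_equal_name_adjustment : Prop := ∀ (name : String), Dom_name_adjustment name → Pre_name_adjustment name → Spec_name_adjustment name (name_adjustment name)

-- ===== LEMMAS AND PROOFS =====

-- the per-character translation both programs compute
def pvG (x : Char) : List Char :=
  if x = '-' ∨ x = ')' ∨ x = '(' ∨ x = '/' then ['_']
  else if x = '\\' then []
  else if x = '+' then ['_','p','l','u','s','_']
  else [x]

theorem pv_go_single (c : Char) (t : List Char) (l : List Char) :
    ∀ (fuel : Nat) (acc : List Char), l.length ≤ fuel →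
    PySem.Chars.replace.go [c] t fuel l acc
      = acc.reverse ++ l.flatMap (fun x => if x = c then t else [x]) := by
  induction l with
  | nil =>
    intro fuel acc _
    cases fuel <;> simp [PySem.Chars.replace.go]
  | cons h tl ih =>
    intro fuel acc hle
    cases fuel with
    | zero => simp at hle
    | succ f =>
      simp only [PySem.Chars.replace.go]
      by_cases hc : h = c
      · subst hc
        simp [List.isPrefixOf, ih f _ (by simpa using hle)]
      · have : ([c].isPrefixOf (h :: tl)) = false := by
          simp [List.isPrefixOf]
          exact fun h' => hc h'.symm
        simp [this, hc, ih f _ (by simpa using hle)]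

-- a Python replace() whose pattern is a single character is a flatMap
theorem pv_replace_single (s : List Char) (c : Char) (t : List Char) :
    PySem.Chars.replace s [c] t = s.flatMap (fun x => if x = c then t else [x]) := by
  simp [PySem.Chars.replace, pv_go_single c t s s.length _ le_rfl]

-- composing A's six per-character substitutions gives pvG
theorem pv_chain_singleton (x : Char) :
    ((((((if x = '-' then ['_'] else [x]).flatMap (fun a => if a = ')' then ['_'] else [a])).flatMap
      (fun a => if a = '(' then ['_'] else [a])).flatMap (fun a => if a = '/' then ['_'] else [a])).flatMap
      (fun a => if a = '\\' then [] else [a])).flatMap (fun a => if a = '+' then ['_','p','l','u','s','_'] else [a]))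
      = pvG x := by
  by_cases h1 : x = '-' <;> by_cases h2 : x = ')' <;> by_cases h3 : x = '(' <;>
    by_cases h4 : x = '/' <;> by_cases h5 : x = '\\' <;> by_cases h6 : x = '+' <;>
    simp_all [pvG]

-- A's whole replace chain, on the character list
theorem pv_chain (s : List Char) :
    (((((s.flatMap (fun a => if a = '-' then ['_'] else [a])).flatMap (fun a => if a = ')' then ['_'] else [a])).flatMap
      (fun a => if a = '(' then ['_'] else [a])).flatMap (fun a => if a = '/' then ['_'] else [a])).flatMap
      (fun a => if a = '\\' then [] else [a])).flatMap (fun a => if a = '+' then ['_','p','l','u','s','_'] else [a])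
      = s.flatMap pvG := by
  induction s with
  | nil => simp
  | cons x tl ih =>
    simp only [List.flatMap_cons, List.flatMap_append]
    rw [ih]
    rw [pv_chain_singleton x]

-- B's table lookup is pvG
theorem pv_table_eq (x : Char) : PySem.Dict.getD pvTableB x [x] = pvG x := by
  by_cases h1 : x = '-'
  · subst h1; decide
  by_cases h2 : x = ')'
  · subst h2; decide
  by_cases h3 : x = '('
  · subst h3; decide
  by_cases h4 : x = '/'
  · subst h4; decide
  by_cases h5 : x = '\\'
  · subst h5; decide
  by_cases h6 : x = '+'
  · subst h6; decide
  have b1 : ('-' == x) = false := by simp [Ne.symm h1]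
  have b2 : (')' == x) = false := by simp [Ne.symm h2]
  have b3 : ('(' == x) = false := by simp [Ne.symm h3]
  have b4 : ('/' == x) = false := by simp [Ne.symm h4]
  have b5 : ('\\' == x) = false := by simp [Ne.symm h5]
  have b6 : ('+' == x) = false := by simp [Ne.symm h6]
  simp [pvG, pvTableB, PySem.Dict.getD, PySem.Dict.get?, PySem.Dict.ofList,
    PySem.Dict.empty, PySem.Dict.update, PySem.Dict.insert, List.find?,
    h1, h2, h3, h4, h5, h6, b1, b2, b3, b4, b5, b6]

theorem pv_join_nil (xs : List (List Char)) : PySem.Chars.join [] xs = xs.flatten := by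
  simp only [PySem.Chars.join, List.intercalate]
  induction xs with
  | nil => rfl
  | cons h t ih =>
    cases t <;> simp_all [List.intersperse]

theorem pv_A_chars (name : String) :
    (PySem.Str.replace (PySem.Str.replace (["-", ")", "(", "/"].foldl
        (fun n e => PySem.Str.replace n e "_") name) "\\" "") "+" "_plus_").toList
      = name.toList.flatMap pvG := by
  simp only [List.foldl_cons, List.foldl_nil, PySem.Str.toList_replace]
  rw [show ("-".toList) = ['-'] from rfl, show (")".toList) = [')'] from rfl,
      show ("(".toList) = ['('] from rfl, show ("/".toList) = ['/'] from rfl,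
      show ("\\".toList) = ['\\'] from rfl, show ("+".toList) = ['+'] from rfl,
      show ("_".toList) = ['_'] from rfl, show ("".toList) = ([] : List Char) from rfl,
      show ("_plus_".toList) = ['_','p','l','u','s','_'] from rfl]
  simp only [pv_replace_single]
  exact pv_chain name.toList

theorem pv_B_chars (name : String) :
    PySem.Chars.join [] (name.toList.foldl
        (fun acc ch => acc ++ [PySem.Dict.getD pvTableB ch [ch]]) [])
      = name.toList.flatMap pvG := by
  rw [PySem.List.foldl_append_singleton_eq_map, pv_join_nil]
  simp only [List.nil_append, List.flatMap_def]
  congr 1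
  exact List.map_congr_left (fun x _ => pv_table_eq x)

-- ===== VERDICT (by name: the statement is the Claim_ definition above) =====
theorem name_adjustment_spec : Claim_equal_name_adjustment := by
  intro name _ _
  unfold Spec_name_adjustment name_adjustment name_adjustment_alt
  simp only [pv_B_chars name]
  have hA := pv_A_chars name
  rw [show (PySem.Str.pyGet? _ (0 : Int)) = PySem.List.pyGet? (name.toList.flatMap pvG) 0 by
        rw [← hA]; simp [PySem.Str.pyGet?]]
  have hofA : (PySem.Str.replace (PySem.Str.replace (["-", ")", "(", "/"].foldl
        (fun n e => PySem.Str.replace n e "_") name) "\\" "") "+" "_plus_")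
      = String.ofList (name.toList.flatMap pvG) := by
    rw [← hA, String.ofList_toList]
  rw [hofA]
  simp only [String.toList_ofList]
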